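-- pv_equiv track=rewrite | github.com/realmattimatt/farkle-dice-challenge | Farkle_v3_animate.py | generate_roll_summary
-- ===== SOURCE A (Python) =====
-- def generate_roll_summary(dice_roll):
--     from collections import Counter
--     counts = Counter(dice_roll)
--     face_names = {1: "one", 2: "two", 3: "three", 4: "four", 5: "five", 6: "six"}
--     summary = []
--     for face in sorted(counts.keys()):
--         count = counts[face]
--         word = face_names.get(face, str(face))
--         summary.append(f"{count} {word}" + ("s" if count > 1 else ""))
--     return ", ".join(summary)
-- ===== SOURCE B (Python) =====
-- def generate_roll_summary(dice_roll):
--     face_names = {1: "one", 2: "two", 3: "three", 4: "four", 5: "five", 6: "six"}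
--
--     def build(rest):
--         if not rest:
--             return []
--         m = min(rest)
--         count = sum(1 for x in rest if x == m)
--         word = face_names.get(m, str(m))
--         part = f"{count} {word}" + ("s" if count > 1 else "")
--         return [part] + build([x for x in rest if x != m])
--
--     return ", ".join(build(dice_roll))
-- ===== Notes on version B (the rewrite author's own statement) =====
-- stated objective: alternative
-- what changed: Replaces the Counter frequency map and the sort of its keys by a selection recursion: repeatedly take the minimum remaining face, count it with one scan, emit its part, and recurse on the list with that face filtered out - no sort and no hash map, faces come out in increasing order by construction.
import Mathlib
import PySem

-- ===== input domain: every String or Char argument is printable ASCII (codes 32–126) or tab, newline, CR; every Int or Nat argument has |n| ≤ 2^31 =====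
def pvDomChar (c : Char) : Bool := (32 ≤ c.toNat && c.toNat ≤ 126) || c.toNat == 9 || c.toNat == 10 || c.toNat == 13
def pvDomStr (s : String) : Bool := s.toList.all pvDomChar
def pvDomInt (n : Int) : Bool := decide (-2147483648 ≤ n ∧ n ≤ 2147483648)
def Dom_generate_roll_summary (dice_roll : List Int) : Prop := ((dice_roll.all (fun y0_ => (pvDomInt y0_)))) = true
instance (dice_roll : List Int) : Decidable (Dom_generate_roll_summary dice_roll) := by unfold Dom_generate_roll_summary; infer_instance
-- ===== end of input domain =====

-- B replaces A's Counter frequency map + sorted-keys loop by a selection recursion: take the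
-- minimum remaining face, count it with one scan, recurse on the rest (objective: alternative).


-- ===== PORT A =====
def generate_roll_summary (dice_roll : List Int) : String :=
  let counts := PySem.Dict.counter dice_roll
  let face_names : PySem.Dict Int String :=
    PySem.Dict.ofList [(1, "one"), (2, "two"), (3, "three"), (4, "four"), (5, "five"), (6, "six")]
  let summary : List String :=
    (PySem.List.sorted counts.keys (fun x => x)).foldl
      (fun summary face =>
        let count := counts.getD face 0
        let word := face_names.getD face (PySem.Int.toStr face)
        summary ++ [PySem.Int.toStr count ++ " " ++ word ++ (if count > 1 then "s" else "")]) []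
  PySem.Str.join ", " summary

-- ===== PORT B =====
-- inner 'build': min(rest) via the running-min loop (PySem min?_id_cons), count by one scan,
-- recurse on the list with the minimum face filtered out.
def grs_build (face_names : PySem.Dict Int String) : List Int → List String
  | [] => []
  | x :: t =>
    let m := t.foldl min x
    let count : Int := (((x :: t).countP (fun y => y == m) : Nat) : Int)
    let word := face_names.getD m (PySem.Int.toStr m)
    let part := PySem.Int.toStr count ++ " " ++ word ++ (if count > 1 then "s" else "")
    part :: grs_build face_names ((x :: t).filter (fun y => y != m))
termination_by rest => rest.length
decreasing_by
  have hm : (t.foldl min x) ∈ x :: t :=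
    PySem.List.min?_mem (xs := x :: t) (key := fun y => y) (PySem.List.min?_id_cons x t)
  simpa using List.length_filter_lt_length_iff_exists.mpr ⟨_, hm, by simp⟩

def generate_roll_summary_alt (dice_roll : List Int) : String :=
  let face_names : PySem.Dict Int String :=
    PySem.Dict.ofList [(1, "one"), (2, "two"), (3, "three"), (4, "four"), (5, "five"), (6, "six")]
  PySem.Str.join ", " (grs_build face_names dice_roll)

-- ===== PRECONDITION & SPEC =====
def Spec_generate_roll_summary (dice_roll : List Int) (out : String) : Prop := out = generate_roll_summary_alt dice_roll
instance (dice_roll : List Int) (out : String) : Decidable (Spec_generate_roll_summary dice_roll out) := by unfold Spec_generate_roll_summary; infer_instance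

-- ===== CLAIM (what is proved, stated in full; the proofs are below) =====
def Claim_equal_generate_roll_summary : Prop := ∀ (dice_roll : List Int), Dom_generate_roll_summary dice_roll → Spec_generate_roll_summary dice_roll (generate_roll_summary dice_roll)

-- ===== LEMMAS AND PROOFS =====

-- two nodup lists with the same members are permutations of each other
theorem grs_perm_of_nodup_of_mem_iff (l l' : List Int) (h1 : l.Nodup) (h2 : l'.Nodup)
    (h : ∀ z : Int, z ∈ l ↔ z ∈ l') : l.Perm l' := by
  refine List.perm_of_nodup_nodup_toFinset_eq h1 h2 ?_
  ext z
  simp [List.mem_toFinset, h z]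

-- The selection recursion produces exactly the sorted distinct faces, each formatted with its
-- multiplicity in the whole list.
theorem grs_build_eq_aux (fn : PySem.Dict Int String) :
    ∀ (n : Nat) (rest : List Int), rest.length ≤ n →
      grs_build fn rest =
        (PySem.List.sorted (PySem.Set.ofList rest) (fun x => x)).map
          (fun k => PySem.Int.toStr ((rest.count k : Nat) : Int) ++ " " ++
            fn.getD k (PySem.Int.toStr k) ++
            (if ((rest.count k : Nat) : Int) > 1 then "s" else "")) := by
  intro n
  induction n with
  | zero =>
    intro rest h
    have h0 : rest = [] := List.eq_nil_of_length_eq_zero (Nat.le_zero.mp h)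
    subst h0
    have h1 : (PySem.List.sorted (PySem.Set.ofList ([] : List Int)) (fun x => x)) = [] := by
      decide
    rw [grs_build, h1]; rfl
  | succ n ih =>
    intro rest hlen
    match rest with
    | [] =>
      have h1 : (PySem.List.sorted (PySem.Set.ofList ([] : List Int)) (fun x => x)) = [] := by
        decide
      rw [grs_build, h1]; rfl
    | x :: t =>
      rw [grs_build]
      show (PySem.Int.toStr (((x :: t).countP (fun y => y == t.foldl min x) : Nat) : Int) ++
          " " ++ fn.getD (t.foldl min x) (PySem.Int.toStr (t.foldl min x)) ++
          (if (((x :: t).countP (fun y => y == t.foldl min x) : Nat) : Int) > 1 then "s" else "")) ::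
          grs_build fn ((x :: t).filter (fun y => y != t.foldl min x)) = _
      set m := t.foldl min x with hm
      have hmmem : m ∈ x :: t :=
        PySem.List.min?_mem (xs := x :: t) (key := fun y => y) (PySem.List.min?_id_cons x t)
      have hmle : ∀ y ∈ x :: t, m ≤ y :=
        PySem.List.min?_isMin (xs := x :: t) (key := fun y => y) (PySem.List.min?_id_cons x t)
      set rest' := (x :: t).filter (fun y => y != m) with hrest'
      have hlt : ∀ z ∈ rest', m < z := by
        intro z hz
        have hz' := List.mem_filter.mp hz
        have := hmle z hz'.1
        have hne : z ≠ m := by simpa using hz'.2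
        omega
      have hmnot : m ∉ rest' := fun h => absurd (hlt m h) (lt_irrefl m)
      have hmemr : ∀ z : Int, z ∈ rest' ↔ (z ∈ x :: t ∧ z ≠ m) := by
        intro z; simp [hrest', List.mem_filter]
      have hsorted_rest' := PySem.List.sorted_ofList_pairwise_lt rest'
      have hnodup' : (PySem.List.sorted (PySem.Set.ofList rest') (fun x => x)).Nodup :=
        hsorted_rest'.imp (fun hab => ne_of_lt hab)
      have hmem_sr : ∀ z : Int,
          z ∈ PySem.List.sorted (PySem.Set.ofList rest') (fun x => x) ↔ z ∈ rest' := by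
        intro z; rw [PySem.List.mem_sorted]; exact PySem.Set.mem_ofList rest' z
      have hset : PySem.List.sorted (PySem.Set.ofList (x :: t)) (fun x => x) =
          m :: PySem.List.sorted (PySem.Set.ofList rest') (fun x => x) := by
        apply PySem.List.sorted_eq_of_perm_of_pairwise_lt
        · apply grs_perm_of_nodup_of_mem_iff
          · refine List.nodup_cons.mpr ⟨fun h => hmnot ((hmem_sr m).mp h), hnodup'⟩
          · exact PySem.Set.nodup_ofList _
          · intro z
            rw [List.mem_cons, hmem_sr z, hmemr z, PySem.Set.mem_ofList]
            by_cases hzm : z = m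
            · simp [hzm, hmmem]
            · simp [hzm]
        · exact List.pairwise_cons.mpr ⟨fun z hz => hlt z ((hmem_sr z).mp hz), hsorted_rest'⟩
      have hcount_m : (x :: t).countP (fun y => y == m) = (x :: t).count m := rfl
      have hcount_tail : ∀ k ∈ rest', (x :: t).count k = rest'.count k := by
        intro k hk
        have hkm : k ≠ m := ((hmemr k).mp hk).2
        rw [hrest', List.count_filter (by simpa using hkm)]
      have hlen' : rest'.length ≤ n := by
        have hdrop : rest'.length < (x :: t).length := by
          simpa [hrest'] using
            List.length_filter_lt_length_iff_exists.mpr ⟨m, hmmem, by simp⟩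
        have := hlen
        simp only [List.length_cons] at hdrop this
        omega
      rw [hset, List.map_cons, ih rest' hlen']
      refine congrArg₂ _ ?_ ?_
      · rw [hcount_m]
      · apply List.map_congr_left
        intro k hk
        rw [hcount_tail k ((hmem_sr k).mp hk)]

-- ===== VERDICT (by name: the statement is the Claim_ definition above) =====
theorem generate_roll_summary_spec : Claim_equal_generate_roll_summary := by
  intro xs _
  show PySem.Str.join ", "
      ((PySem.List.sorted (PySem.Dict.counter xs).keys (fun x => x)).foldl
        (fun summary face =>
          summary ++ [PySem.Int.toStr ((PySem.Dict.counter xs).getD face 0) ++ " " ++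
            (PySem.Dict.ofList [((1 : Int), "one"), (2, "two"), (3, "three"), (4, "four"),
              (5, "five"), (6, "six")]).getD face (PySem.Int.toStr face) ++
            (if (PySem.Dict.counter xs).getD face 0 > 1 then "s" else "")]) []) =
    PySem.Str.join ", "
      (grs_build (PySem.Dict.ofList [((1 : Int), "one"), (2, "two"), (3, "three"), (4, "four"),
        (5, "five"), (6, "six")]) xs)
  rw [grs_build_eq_aux _ xs.length xs le_rfl, PySem.Dict.keys_counter,
    PySem.List.foldl_append_singleton_eq_map, List.nil_append]
  refine congrArg _ (List.map_congr_left ?_)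
  intro k _
  simp only [PySem.Dict.getD_counter]
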